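-- pv_equiv track=rewrite | github.com/vicradon/100DaysOfAlgo | distinct_primes_factors.py | setsAreDistinctAndSameLength
-- ===== SOURCE A (Python) =====
-- def setsAreDistinctAndSameLength(sets, setLength):
--     iteratedItems = []
--
--     for index in range(len(sets)):
--         if len(sets[index]) != setLength:
--             return False
--         for item in sets[index]:
--             if item in iteratedItems:
--                 return False
--             iteratedItems.append(item)
--
--     return True
-- ===== SOURCE B (Python) =====
-- def setsAreDistinctAndSameLength(sets, setLength):
--     if any(len(s) != setLength for s in sets):
--         return False
--     items = [x for s in sets for x in s]
--     return len(set(items)) == len(items)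
-- ===== Notes on version B (the rewrite author's own statement) =====
-- stated objective: simpler
-- what changed: Replaces A's incremental membership-tracking loop (linear scan of an accumulator per item, with per-item early returns) by a whole-collection check: verify all lengths with any(), flatten once, and compare len(set(items)) with len(items).
import Mathlib
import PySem

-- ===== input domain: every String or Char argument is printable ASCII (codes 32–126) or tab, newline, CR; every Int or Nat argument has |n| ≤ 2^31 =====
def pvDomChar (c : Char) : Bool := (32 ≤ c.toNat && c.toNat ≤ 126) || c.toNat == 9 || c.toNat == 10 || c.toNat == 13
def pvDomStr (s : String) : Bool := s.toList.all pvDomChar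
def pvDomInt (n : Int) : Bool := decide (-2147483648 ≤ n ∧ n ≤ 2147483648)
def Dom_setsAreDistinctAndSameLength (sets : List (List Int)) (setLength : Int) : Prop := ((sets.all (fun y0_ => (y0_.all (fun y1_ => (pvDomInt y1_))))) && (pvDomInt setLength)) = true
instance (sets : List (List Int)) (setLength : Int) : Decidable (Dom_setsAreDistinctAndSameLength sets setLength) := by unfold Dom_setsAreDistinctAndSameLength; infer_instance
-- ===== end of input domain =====

-- B replaces A's incremental membership-tracking loop by a length check with any(),
-- a single flatten, and one global set-cardinality distinctness test (objective: simpler).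

-- ===== PORT A =====
-- inner 'for item in sets[index]' loop: returns none on the early 'return False',
-- otherwise the updated iteratedItems accumulator
def pvInnerA (acc : List Int) (items : List Int) : Option (List Int) :=
  match items with
  | [] => some acc
  | x :: rest => if x ∈ acc then none else pvInnerA (acc ++ [x]) rest

-- outer 'for index in range(len(sets))' loop carrying iteratedItems
def pvOuterA (sets : List (List Int)) (setLength : Int) (acc : List Int) : Bool :=
  match sets with
  | [] => true
  | s :: rest =>
    if (s.length : Int) ≠ setLength then false
    else
      match pvInnerA acc s with
      | none => false
      | some acc' => pvOuterA rest setLength acc'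

def setsAreDistinctAndSameLength (sets : List (List Int)) (setLength : Int) : Bool :=
  pvOuterA sets setLength []

-- ===== PORT B =====
def setsAreDistinctAndSameLength_alt (sets : List (List Int)) (setLength : Int) : Bool :=
  if sets.any (fun s => (s.length : Int) ≠ setLength) then false
  else
    let items := sets.flatMap (fun s => s)
    (PySem.Set.ofList items).length == items.length

-- ===== PRECONDITION & SPEC =====
def Spec_setsAreDistinctAndSameLength (sets : List (List Int)) (setLength : Int) (out : Bool) : Prop := out = setsAreDistinctAndSameLength_alt sets setLength
instance (sets : List (List Int)) (setLength : Int) (out : Bool) : Decidable (Spec_setsAreDistinctAndSameLength sets setLength out) := by unfold Spec_setsAreDistinctAndSameLength; infer_instance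

-- ===== CLAIM (what is proved, stated in full; the proofs are below) =====
def Claim_equal_setsAreDistinctAndSameLength : Prop := ∀ (sets : List (List Int)) (setLength : Int), Dom_setsAreDistinctAndSameLength sets setLength → Spec_setsAreDistinctAndSameLength sets setLength (setsAreDistinctAndSameLength sets setLength)

-- ===== LEMMAS AND PROOFS =====

-- a list with an element of s repeated after s is not duplicate-free
theorem pvNotNodupMid (s rest : List Int) (x : Int) (hx : x ∈ s) :
    ¬ (s ++ x :: rest).Nodup := by
  intro hc
  exact (List.disjoint_of_nodup_append hc) hx (by simp)

theorem pvNodupSnoc (s : List Int) (x : Int) (h : s.Nodup) (hx : x ∉ s) :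
    (s ++ [x]).Nodup := by
  simp [List.nodup_append, h]
  exact fun a ha he => hx (he ▸ ha)

-- the inner loop succeeds exactly when appending the items keeps the accumulator duplicate-free
theorem pvInnerA_spec (s acc : List Int) (h : acc.Nodup) :
    pvInnerA acc s = if (acc ++ s).Nodup then some (acc ++ s) else none := by
  induction s generalizing acc with
  | nil => simp [pvInnerA, h]
  | cons x rest ih =>
    by_cases hx : x ∈ acc
    · simp [pvInnerA, hx, pvNotNodupMid acc rest x hx]
    · rw [pvInnerA]
      simp only [hx, if_false]
      rw [ih _ (pvNodupSnoc acc x h hx), List.append_assoc]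
      simp

theorem pvOuterA_spec (sets : List (List Int)) (L : Int) (acc : List Int) (h : acc.Nodup) :
    pvOuterA sets L acc =
      (decide (∀ s ∈ sets, (s.length : Int) = L) &&
       decide ((acc ++ sets.flatMap (fun s => s)).Nodup)) := by
  induction sets generalizing acc with
  | nil => simp [pvOuterA, h]
  | cons s rest ih =>
    by_cases hl : (s.length : Int) = L
    · by_cases hnd : (acc ++ s).Nodup
      · simp only [pvOuterA, pvInnerA_spec s acc h, hnd, if_true, hl, ne_eq,
          not_true_eq_false, if_false, ih _ hnd]
        simp [hl, List.append_assoc]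
      · have hflat : ¬ (acc ++ (s ++ rest.flatten)).Nodup := by
          intro hc
          apply hnd
          exact hc.sublist (by rw [← List.append_assoc]; exact List.sublist_append_left _ _)
        simp [pvOuterA, pvInnerA_spec s acc h, hnd, hl, hflat]
    · simp [pvOuterA, hl]

theorem pvLenFoldlAddLe (xs s : List Int) :
    (xs.foldl PySem.Set.add s).length ≤ s.length + xs.length := by
  induction xs generalizing s with
  | nil => simp
  | cons x rest ih =>
    simp only [List.foldl_cons]
    calc (rest.foldl PySem.Set.add (PySem.Set.add s x)).length
        ≤ (PySem.Set.add s x).length + rest.length := ih _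
      _ ≤ (s.length + 1) + rest.length := by
          have : (PySem.Set.add s x).length ≤ s.length + 1 := by
            unfold PySem.Set.add
            split <;> simp
          omega
      _ = s.length + (x :: rest).length := by simp; omega

theorem pvFoldlAddLenIff (xs s : List Int) (h : s.Nodup) :
    (xs.foldl PySem.Set.add s).length = s.length + xs.length ↔ (s ++ xs).Nodup := by
  induction xs generalizing s with
  | nil => simp [h]
  | cons x rest ih =>
    simp only [List.foldl_cons]
    by_cases hx : x ∈ s
    · have hadd : PySem.Set.add s x = s := by
        unfold PySem.Set.add
        simp [PySem.Set.contains, hx]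
      rw [hadd]
      have hle := pvLenFoldlAddLe rest s
      constructor
      · intro hlen; simp at hlen; omega
      · intro hc
        exact absurd hc (pvNotNodupMid s rest x hx)
    · have hadd : PySem.Set.add s x = s ++ [x] := by
        unfold PySem.Set.add
        simp [PySem.Set.contains, hx]
      rw [hadd]
      have h2 := ih (s ++ [x]) (pvNodupSnoc s x h hx)
      rw [List.append_assoc] at h2
      simp only [List.length_append, List.length_cons, List.length_nil,
        List.singleton_append] at h2 ⊢
      exact Iff.intro (fun he => h2.mp (by omega)) (fun hn => by have := h2.mpr hn; omega)

theorem pvOfListLenIff (xs : List Int) :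
    ((PySem.Set.ofList xs).length = xs.length) ↔ xs.Nodup := by
  rw [PySem.Set.ofList_eq_foldl]
  have := pvFoldlAddLenIff xs [] (by simp)
  simpa using this

-- ===== VERDICT (by name: the statement is the Claim_ definition above) =====
theorem setsAreDistinctAndSameLength_spec : Claim_equal_setsAreDistinctAndSameLength := by
  intro sets L _
  unfold Spec_setsAreDistinctAndSameLength setsAreDistinctAndSameLength setsAreDistinctAndSameLength_alt
  rw [pvOuterA_spec sets L [] List.nodup_nil]
  simp only [List.nil_append]
  by_cases hany : sets.any (fun s => decide ((s.length : Int) ≠ L)) = true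
  · rw [if_pos hany]
    have hnall : ¬ ∀ s ∈ sets, (s.length : Int) = L := by
      obtain ⟨s, hs, hne⟩ := List.any_eq_true.mp hany
      simp only [decide_eq_true_eq] at hne
      exact fun hc => hne (hc s hs)
    rw [decide_eq_false hnall, Bool.false_and]
  · rw [if_neg hany]
    have hall : ∀ s ∈ sets, (s.length : Int) = L := by
      intro s hs
      by_contra hne
      exact hany (List.any_eq_true.mpr ⟨s, hs, by simp [hne]⟩)
    have hiff := pvOfListLenIff (sets.flatMap (fun s => s))
    rw [Bool.eq_iff_iff]
    simp only [Bool.and_eq_true, decide_eq_true_eq, beq_iff_eq]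
    exact ⟨fun h => hiff.mpr h.2, fun hc => ⟨hall, hiff.mp hc⟩⟩
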